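-- pv_equiv track=rewrite | github.com/VoyakinH/Py | Двойное время.py | to_ylian
-- ===== SOURCE A (Python) =====
-- def to_ylian(d, m, y):
--     kol_days = [31, 28, 31, 30, 31, 30, 31, 31, 30, 31, 30, 31]
--     perevod = 10
--     for i in range(1582, y):
--         if i % 100 == 0 and i % 400 != 0:
--             perevod += 1
--     if (y % 100 != 0 or y % 400 == 0) or y % 4 == 0:
--         kol_days[1] = 29
--     d -= perevod
--     if d <= 0:
--         m -= 1
--         if m ==0:
--             y -= 1
--             m = 12
--         d += kol_days[m - 1]
--     return d, m, y
-- ===== SOURCE B (Python) =====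
-- def to_ylian(d, m, y):
--     # O(1): closed-form count of century-non-400 years in [1582, y)
--     d -= 10 + max(0, (y - 1) // 100 - (y - 1) // 400 - 12)
--     if d > 0:
--         return d, m, y
--     if m == 1:
--         return d + 31, 12, y - 1
--     days = (31, 29, 31, 30, 31, 30, 31, 31, 30, 31, 30, 31)
--     return d + days[(m - 2) % 12], m - 1, y
-- ===== Notes on version B (the rewrite author's own statement) =====
-- stated objective: faster
-- what changed: Replaced A's O(y) loop over every year in [1582, y) counting century-non-400 years with the closed-form count max(0, (y-1)//100 - (y-1)//400 - 12), and replaced the mutable month-table patching with a direct cyclic month step back.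
import Mathlib
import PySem

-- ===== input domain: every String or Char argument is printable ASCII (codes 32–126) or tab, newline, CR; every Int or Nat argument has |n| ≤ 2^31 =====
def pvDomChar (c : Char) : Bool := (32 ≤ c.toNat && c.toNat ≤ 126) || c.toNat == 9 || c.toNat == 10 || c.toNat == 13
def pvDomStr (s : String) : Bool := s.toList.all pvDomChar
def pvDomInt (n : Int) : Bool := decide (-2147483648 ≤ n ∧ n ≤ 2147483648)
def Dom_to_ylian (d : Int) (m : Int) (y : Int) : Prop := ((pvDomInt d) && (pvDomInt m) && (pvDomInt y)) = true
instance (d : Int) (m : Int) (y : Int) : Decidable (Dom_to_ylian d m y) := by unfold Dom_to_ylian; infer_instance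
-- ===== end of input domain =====

-- B replaces A's O(y) year-by-year loop counting century-non-400 years with a closed-form
-- count, making the conversion O(1) (objective: faster, asymptotic).
-- ===== PORT A =====
-- Literal port of A. Python's `kol_days[m - 1]` raises IndexError when the index is out of
-- range; pyGet? is `none` exactly there, and Pre_to_ylian excludes those inputs, so the
-- `.getD 0` default is never reached on admitted inputs.
def to_ylian (d : Int) (m : Int) (y : Int) : List Int :=
  let kol_days : List Int := [31, 28, 31, 30, 31, 30, 31, 31, 30, 31, 30, 31]
  let perevod : Int :=
    (PySem.List.pyRange 1582 y 1).foldl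
      (fun p i => if PySem.Int.mod i 100 = 0 ∧ PySem.Int.mod i 400 ≠ 0 then p + 1 else p) 10
  let kol_days : List Int :=
    if (PySem.Int.mod y 100 ≠ 0 ∨ PySem.Int.mod y 400 = 0) ∨ PySem.Int.mod y 4 = 0
    then kol_days.set 1 29 else kol_days
  let d := d - perevod
  if d ≤ 0 then
    let m := m - 1
    let my : Int × Int := if m = 0 then (12, y - 1) else (m, y)
    let d := d + (PySem.List.pyGet? kol_days (my.1 - 1)).getD 0
    [d, my.1, my.2]
  else
    [d, m, y]

-- ===== PORT B =====
-- Literal port of Source B: closed-form shift, then one cyclic month step back.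
def to_ylian_alt (d : Int) (m : Int) (y : Int) : List Int :=
  let d := d - (10 + max 0 (PySem.Int.floordiv (y - 1) 100 - PySem.Int.floordiv (y - 1) 400 - 12))
  if d > 0 then [d, m, y]
  else if m = 1 then [d + 31, 12, y - 1]
  else
    let days : List Int := [31, 29, 31, 30, 31, 30, 31, 31, 30, 31, 30, 31]
    [d + (PySem.List.pyGet? days (PySem.Int.mod (m - 2) 12)).getD 0, m - 1, y]

-- ===== PRECONDITION & SPEC =====
-- Pre_ excludes exactly the inputs on which A raises IndexError: after the shift the day is
-- non-positive and the decremented month indexes kol_days outside Python's negative-index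
-- range (m < -10 or m > 13, m ≠ 1). A returns on every input satisfying Pre_.
def Pre_to_ylian (d : Int) (m : Int) (y : Int) : Prop :=
  d - (10 + max 0 (PySem.Int.floordiv (y - 1) 100 - PySem.Int.floordiv (y - 1) 400 - 12)) > 0
  ∨ m = 1 ∨ (-10 ≤ m ∧ m ≤ 13)
instance (d : Int) (m : Int) (y : Int) : Decidable (Pre_to_ylian d m y) := by
  unfold Pre_to_ylian; infer_instance
def pvWitness_to_ylian : Int × Int × Int := (5, 3, 1600)

def Spec_to_ylian (d : Int) (m : Int) (y : Int) (out : List Int) : Prop := out = to_ylian_alt d m y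
instance (d : Int) (m : Int) (y : Int) (out : List Int) : Decidable (Spec_to_ylian d m y out) := by
  unfold Spec_to_ylian; infer_instance

-- ===== CLAIM (what is proved, stated in full; the proofs are below) =====
def Claim_equal_to_ylian : Prop := ∀ (d : Int) (m : Int) (y : Int), Dom_to_ylian d m y → Pre_to_ylian d m y → Spec_to_ylian d m y (to_ylian d m y)

-- ===== LEMMAS AND PROOFS =====

-- A's loop, started at 10, equals the closed-form shift used by B.
theorem pv_count_cf (y : Int) :
    (PySem.List.pyRange 1582 y 1).foldl
      (fun p i => if PySem.Int.mod i 100 = 0 ∧ PySem.Int.mod i 400 ≠ 0 then p + 1 else p) 10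
    = 10 + max 0 (PySem.Int.floordiv (y - 1) 100 - PySem.Int.floordiv (y - 1) 400 - 12) := by
  rw [PySem.Int.floordiv_eq_ediv_of_pos (by norm_num), PySem.Int.floordiv_eq_ediv_of_pos (by norm_num)]
  rcases (by omega : y ≤ 1582 ∨ 1582 < y) with h | h
  · have hnil : PySem.List.pyRange 1582 y 1 = [] := by
      simp [PySem.List.pyRange_one, (by omega : (y - 1582).toNat = 0)]
    rw [hnil]
    simp only [List.foldl_nil]
    omega
  · obtain ⟨n, hn⟩ : ∃ n : Nat, y = 1583 + n := ⟨(y - 1583).toNat, by omega⟩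
    subst hn
    clear h
    induction n with
    | zero => decide
    | succ k ih =>
      have hk : (1582 : Int) ≤ 1583 + k := by omega
      rw [show ((1583 : Int) + ((k : Nat) + 1 : Nat)) = (1583 + (k : Int)) + 1 by push_cast; ring,
        PySem.List.pyRange_one_succ_right hk, List.foldl_append, ih]
      simp only [List.foldl_cons, List.foldl_nil,
        PySem.Int.mod_eq_emod_of_pos (a := 1583 + (k : Int)) (b := 100) (by norm_num),
        PySem.Int.mod_eq_emod_of_pos (a := 1583 + (k : Int)) (b := 400) (by norm_num)]
      split_ifs with hc
      · omega
      · omega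

-- The leap-year test in A is a tautology (y % 100 == 0 forces y % 4 == 0).
theorem pv_leap_always (y : Int) :
    (PySem.Int.mod y 100 ≠ 0 ∨ PySem.Int.mod y 400 = 0) ∨ PySem.Int.mod y 4 = 0 := by
  rw [PySem.Int.mod_eq_emod_of_pos (by norm_num), PySem.Int.mod_eq_emod_of_pos (by norm_num),
    PySem.Int.mod_eq_emod_of_pos (by norm_num)]
  omega

-- In-range indexing of the (leap-fixed) month table agrees with B's cyclic index.
theorem pv_index_wrap (m : Int) (h1 : -10 ≤ m) (h2 : m ≤ 13) (h3 : m ≠ 1) :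
    PySem.List.pyGet? ([31, 29, 31, 30, 31, 30, 31, 31, 30, 31, 30, 31] : List Int) (m - 2)
    = PySem.List.pyGet? ([31, 29, 31, 30, 31, 30, 31, 31, 30, 31, 30, 31] : List Int)
        (PySem.Int.mod (m - 2) 12) := by
  interval_cases m <;> simp_all <;> rfl

-- ===== VERDICT (by name: the statement is the Claim_ definition above) =====
theorem to_ylian_spec : Claim_equal_to_ylian := by
  intro d m y _hD hP
  unfold Spec_to_ylian to_ylian to_ylian_alt
  rw [pv_count_cf]
  simp only [if_pos (pv_leap_always y)]
  rw [show (([31, 28, 31, 30, 31, 30, 31, 31, 30, 31, 30, 31] : List Int).set 1 29)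
      = ([31, 29, 31, 30, 31, 30, 31, 31, 30, 31, 30, 31] : List Int) from rfl]
  set D := d - (10 + max 0 (PySem.Int.floordiv (y - 1) 100 - PySem.Int.floordiv (y - 1) 400 - 12)) with hDdef
  by_cases h : D ≤ 0
  · rw [if_pos h, if_neg (by omega : ¬ D > 0)]
    by_cases hm : m = 1
    · subst hm; rw [if_pos rfl]; rfl
    · rw [if_neg (by omega : ¬ (m - 1 = 0)), if_neg hm]
      have hr : -10 ≤ m ∧ m ≤ 13 := by
        rcases hP with h1 | h1 | h1
        · omega
        · exact absurd h1 hm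
        · exact h1
      have := pv_index_wrap m hr.1 hr.2 hm
      simp only [show m - 1 - 1 = m - 2 by ring] at *
      rw [this]
  · rw [if_neg h, if_pos (by omega : D > 0)]
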